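-- pv_equiv track=rewrite | github.com/ansumanm/Python | DynamicProgramming/BuySellStock2.py | max2Generator
-- ===== SOURCE A (Python) =====
-- from typing import List
--
-- def max2Generator(prices: List[int]):
-- 	"""
-- 		Calculate incrementally from reverse.
-- 		Store the result in a list,
-- 		and return the element from the list one by one.
-- 	Args:
-- 		prices (List[int]): List of prices
-- 	"""
-- 	# Initialize the profits array.
-- 	# d[i] represents profit from i to end date.
-- 	profits = [0] * len(prices)
-- 	maxP = 0
--
-- 	sellPrice = prices[-1]
-- 	for index in range(len(prices) - 1, -1, -1):
-- 		buyPrice = prices[index]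
-- 		maxP = max(maxP, sellPrice - buyPrice)
-- 		if buyPrice > sellPrice:
-- 			sellPrice = buyPrice
-- 		profits[index] = maxP
--
-- 	for profit in profits:
-- 		yield profit
-- ===== SOURCE B (Python) =====
-- from typing import List
--
-- def max2Generator(prices: List[int]):
--     """Two backward passes: an explicit suffix-maximum array, then a running best profit."""
--     n = len(prices)
--     suff = [0] * n
--     suff[n - 1] = prices[-1]          # raises IndexError on empty input, like the original
--     for i in range(n - 2, -1, -1):
--         suff[i] = max(prices[i], suff[i + 1])
--     profits = [0] * n
--     best = 0
--     for i in range(n - 1, -1, -1):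
--         best = max(best, suff[i] - prices[i])
--         profits[i] = best
--     yield from profits
-- ===== Notes on version B (the rewrite author's own statement) =====
-- stated objective: alternative
-- what changed: B first materialises an explicit suffix-maximum-price array in one backward pass, then a second backward pass derives each profit as a running max of (suffix_max - price), instead of A's single pass that interleaves the running sell price with the running profit.
import Mathlib
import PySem

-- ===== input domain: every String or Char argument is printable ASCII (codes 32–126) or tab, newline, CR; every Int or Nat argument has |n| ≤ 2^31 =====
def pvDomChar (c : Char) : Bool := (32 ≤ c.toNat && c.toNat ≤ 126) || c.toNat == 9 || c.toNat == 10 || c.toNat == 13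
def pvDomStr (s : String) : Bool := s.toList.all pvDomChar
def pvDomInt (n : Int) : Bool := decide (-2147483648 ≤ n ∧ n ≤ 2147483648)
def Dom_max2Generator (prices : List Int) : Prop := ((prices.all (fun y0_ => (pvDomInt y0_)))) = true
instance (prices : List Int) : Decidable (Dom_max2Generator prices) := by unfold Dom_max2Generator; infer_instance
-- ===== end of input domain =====

-- B is an alternative decomposition (explicit suffix-max array, then a running best); same O(n) cost.

-- ===== PORT A =====
-- A's backward index loop 'for index in range(len(prices)-1, -1, -1)' carrying
-- (maxP, sellPrice) and writing profits[index], rendered as structural recursion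
-- from the right over the same list with the same state; the prepended results
-- are exactly the profits array read in order.
def maxGoA : List Int → Int → Int → (List Int × Int × Int)
  | [], maxP, sell => ([], maxP, sell)
  | p :: rest, maxP, sell =>
    let r := maxGoA rest maxP sell
    let m := max r.2.1 (r.2.2 - p)
    let s := if p > r.2.2 then p else r.2.2
    (m :: r.1, m, s)

def max2Generator (prices : List Int) : List Int :=
  match PySem.List.pyGet? prices (-1) with   -- sellPrice = prices[-1]; none = IndexError (outside Pre_)
  | none => []
  | some sell => (maxGoA prices 0 sell).1

-- ===== PORT B =====
-- first backward pass of Source B: suff[i] = max(prices[i], suff[i+1])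
def suffB : List Int → List Int
  | [] => []
  | p :: rest =>
    match suffB rest with
    | [] => [p]
    | x :: xs => max p x :: x :: xs

-- second backward pass of Source B: best = max(best, suff[i] - prices[i]); profits[i] = best
def goB : List Int → List Int → (List Int × Int)
  | s :: ss, p :: ps =>
    let r := goB ss ps
    let b := max r.2 (s - p)
    (b :: r.1, b)
  | _, _ => ([], 0)

def max2Generator_alt (prices : List Int) : List Int :=
  match PySem.List.pyGet? prices (-1) with   -- suff[n-1] = prices[-1]; none = IndexError (outside Pre_)
  | none => []
  | some _ => (goB (suffB prices) prices).1

-- ===== PRECONDITION & SPEC =====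
-- Both Pythons raise IndexError (prices[-1]) on the empty list; Pre_ excludes exactly that.
def Pre_max2Generator (prices : List Int) : Prop := prices ≠ []
instance (prices : List Int) : Decidable (Pre_max2Generator prices) := by unfold Pre_max2Generator; infer_instance
def pvWitness_max2Generator : List Int := [1, 5, 3]

def Spec_max2Generator (prices : List Int) (out : List Int) : Prop := out = max2Generator_alt prices
instance (prices : List Int) (out : List Int) : Decidable (Spec_max2Generator prices out) := by unfold Spec_max2Generator; infer_instance

-- ===== CLAIM (what is proved, stated in full; the proofs are below) =====
def Claim_equal_max2Generator : Prop := ∀ (prices : List Int), Dom_max2Generator prices → Pre_max2Generator prices → Spec_max2Generator prices (max2Generator prices)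

-- ===== LEMMAS AND PROOFS =====

-- Main invariant, by induction on the part of the list before the last element t:
-- suffB of l++[t] is nonempty with head h = the suffix maximum, A's state on l++[t]
-- started at (0, t) matches B's second pass, A's sellPrice equals h, and best ≥ 0.
lemma key (l : List Int) (t : Int) :
    ∃ h S, suffB (l ++ [t]) = h :: S ∧
      maxGoA (l ++ [t]) 0 t =
        ((goB (h :: S) (l ++ [t])).1, (goB (h :: S) (l ++ [t])).2, h) ∧
      0 ≤ (goB (h :: S) (l ++ [t])).2 := by
  induction l with
  | nil =>
    refine ⟨t, [], by simp [suffB], ?_, ?_⟩ <;>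
      simp [maxGoA, goB]
  | cons p l' ih =>
    obtain ⟨h, S, hs, hA, hb⟩ := ih
    refine ⟨max p h, h :: S, ?_, ?_, ?_⟩
    · simp only [List.cons_append, suffB, hs]
    · simp only [List.cons_append, maxGoA, goB, hA, Prod.mk.injEq, List.cons.injEq]
      and_intros <;> first | trivial | omega
    · simp only [List.cons_append, goB]
      omega

-- ===== VERDICT (by name: the statement is the Claim_ definition above) =====
theorem max2Generator_spec : Claim_equal_max2Generator := by
  intro prices _ hpre
  rcases (List.eq_nil_or_concat prices) with h | ⟨l, t, rfl⟩
  · exact absurd h hpre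
  obtain ⟨h, S, hs, hA, _⟩ := key l t
  show max2Generator _ = max2Generator_alt _
  unfold max2Generator max2Generator_alt
  simp only [List.concat_eq_append, PySem.List.pyGet?_neg_one_append_singleton]
  simp only [hs, hA]
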